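-- pv_equiv track=rewrite | github.com/chickengak/TIL | 프로그래머스/1/135808. 과일 장수/과일 장수.py | solution
-- ===== SOURCE A (Python) =====
-- def solution(k, m, score):
--     score_dict = {i:0 for i in range(k, 0,-1)}
--     for s in score:
--         score_dict[s] +=1
--     answer = 0
--     toss = 0
--     for key, val in score_dict.items():
--         share, remainder = divmod(val+toss, m)
--         answer += key*m*share
--         toss = remainder
--     return answer
-- ===== SOURCE B (Python) =====
-- def solution(k, m, score):
--     cnt = [0] * k
--     for x in score:
--         cnt[x - 1] += 1
--     s = []
--     for v in range(k, 0, -1):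
--         s += [v] * cnt[v - 1]
--     answer = 0
--     i = m - 1
--     while i < len(s):
--         answer += m * s[i]
--         i += m
--     return answer
-- ===== Notes on version B (the rewrite author's own statement) =====
-- stated objective: alternative
-- what changed: Replaced the remainder-carrying divmod scan over the count dict by materializing the descending sorted score list (a counting sort) and an index walk summing m*s[i] at i = m-1, 2m-1, ...
-- outside the precondition, e.g. on solution(3, -2, [1, 2, 3]): A returns 8, B raises IndexError
import Mathlib
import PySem

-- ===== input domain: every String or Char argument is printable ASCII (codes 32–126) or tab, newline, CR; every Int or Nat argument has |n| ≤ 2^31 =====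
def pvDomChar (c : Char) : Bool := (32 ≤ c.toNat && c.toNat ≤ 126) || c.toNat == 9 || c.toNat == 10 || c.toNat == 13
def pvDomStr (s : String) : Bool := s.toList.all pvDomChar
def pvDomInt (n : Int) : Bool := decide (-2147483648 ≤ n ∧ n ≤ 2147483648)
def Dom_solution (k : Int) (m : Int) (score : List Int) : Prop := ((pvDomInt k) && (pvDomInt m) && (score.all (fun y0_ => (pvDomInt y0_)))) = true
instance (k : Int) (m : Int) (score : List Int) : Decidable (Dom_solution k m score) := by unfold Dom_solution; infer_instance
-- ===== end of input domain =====

-- B replaces A's remainder-carrying divmod scan over the count dict by materializing the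
-- descending sorted score list (counting sort) and summing m*s[i] at every m-th index
-- (objective: alternative).

-- ===== PORT A =====
-- 'score_dict[s] += 1' raises KeyError when s is not a key; Pre_solution excludes that, and
-- under it Dict.modify (d[s] = f(d.get(s, 0))) is exact. divmod is ported as the
-- floordiv/mod pair (m ≠ 0 under Pre_solution).
def solution (k : Int) (m : Int) (score : List Int) : Int :=
  let d0 : PySem.Dict Int Int :=
    (PySem.List.pyRange k 0 (-1)).foldl (fun d i => d.insert i 0) PySem.Dict.empty
  let d1 : PySem.Dict Int Int :=
    score.foldl (fun d s => d.modify s 0 (· + 1)) d0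
  let p : Int × Int :=
    d1.items.foldl (fun (acc : Int × Int) kv =>
      (acc.1 + kv.1 * m * PySem.Int.floordiv (kv.2 + acc.2) m,
       PySem.Int.mod (kv.2 + acc.2) m)) (0, 0)
  p.1

-- ===== PORT B =====
-- The 'while i < len(s)' walk, totalized with fuel s.length — enough iterations whenever
-- m ≥ 1 (each step advances i by m); for m ≤ 0 the Python diverges or raises IndexError,
-- which Pre_solution excludes.
def strideLoop (s : List Int) (m : Int) : Nat → Int → Int → Int
  | 0, _, answer => answer
  | fuel + 1, i, answer =>
    if i < (s.length : Int) then
      strideLoop s m fuel (i + m) (answer + m * PySem.List.pyGetD s i 0)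
    else answer

-- 'cnt[x - 1] += 1' raises IndexError for x > k or x ≤ -k; Pre_solution excludes scores
-- outside 1..k, and under it (and Python's negative-index wrap, which pySetD/pyGetD share)
-- the port is exact.
def solution_alt (k : Int) (m : Int) (score : List Int) : Int :=
  let cnt : List Int := PySem.List.pyRepeat [0] k
  let cnt := score.foldl (fun c x =>
    PySem.List.pySetD c (x - 1) (PySem.List.pyGetD c (x - 1) 0 + 1)) cnt
  let s := (PySem.List.pyRange k 0 (-1)).foldl
    (fun s v => s ++ PySem.List.pyRepeat [v] (PySem.List.pyGetD cnt (v - 1) 0)) []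
  strideLoop s m s.length (m - 1) 0

-- ===== PRECONDITION & SPEC =====
-- Pre_solution restricts to the problem's natural domain: for m = 0 A raises ZeroDivisionError
-- (when k ≥ 1), for m < 0 A returns floor-division artefacts of a negative box size that no
-- caller would specify (see cites), and for scores outside 1..k A raises KeyError.
def Pre_solution (k : Int) (m : Int) (score : List Int) : Prop :=
  1 ≤ m ∧ ∀ s ∈ score, 1 ≤ s ∧ s ≤ k
instance (k : Int) (m : Int) (score : List Int) : Decidable (Pre_solution k m score) := by
  unfold Pre_solution; infer_instance
def pvWitness_solution : Int × Int × List Int := (5, 3, [1, 5, 4, 2, 3, 5, 2])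

def Spec_solution (k : Int) (m : Int) (score : List Int) (out : Int) : Prop := out = solution_alt k m score
instance (k : Int) (m : Int) (score : List Int) (out : Int) : Decidable (Spec_solution k m score out) := by unfold Spec_solution; infer_instance

-- ===== CLAIM (what is proved, stated in full; the proofs are below) =====
def Claim_equal_solution : Prop := ∀ (k : Int) (m : Int) (score : List Int), Dom_solution k m score → Pre_solution k m score → Spec_solution k m score (solution k m score)

-- ===== LEMMAS AND PROOFS =====

-- Proof-only reference functions.

-- afold runs A's key scan on (key, count) pairs with the toss carried as a Nat, the common
-- factor m divided out of the answer.
def afold (m : Nat) : List (Int × Nat) → Nat → Int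
  | [], _ => 0
  | (j, c) :: ps, r => j * (((c + r) / m : Nat) : Int) + afold m ps ((c + r) % m)

-- chunkSum s = sum of s[m-1], s[2m-1], … taken by repeatedly dropping m elements.
def chunkSum (m : Nat) (s : List Int) : Int :=
  if _h : 0 < m ∧ m ≤ s.length then
    s.getD (m - 1) 0 + chunkSum m (s.drop m)
  else 0
termination_by s.length
decreasing_by simp; omega

lemma chunkSum_small {m : Nat} {s : List Int} (h : s.length < m) : chunkSum m s = 0 := by
  rw [chunkSum, dif_neg (by omega)]

lemma items_build (ks : List Int) (d : PySem.Dict Int Int)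
    (hnd : ks.Nodup) (hc : ∀ x ∈ ks, d.contains x = false) :
    (ks.foldl (fun d i => d.insert i 0) d).items = d.items ++ ks.map (fun j => (j, (0 : Int))) := by
  induction ks generalizing d with
  | nil => simp
  | cons x ks ih =>
    simp only [List.foldl_cons]
    rw [ih (d.insert x 0) hnd.of_cons ?_, PySem.Dict.items_insert_of_not_contains d 0 (hc x (by simp))]
    · simp
    · intro y hy
      rw [PySem.Dict.contains_insert]
      have hne : y ≠ x := fun h => (List.nodup_cons.mp hnd).1 (h ▸ hy)
      simp [hne, hc y (List.mem_cons_of_mem _ hy)]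

lemma contains_build (ks : List Int) (d : PySem.Dict Int Int) (y : Int) :
    (ks.foldl (fun d i => d.insert i 0) d).contains y = (decide (y ∈ ks) || d.contains y) := by
  induction ks generalizing d with
  | nil => simp
  | cons x ks ih =>
    simp only [List.foldl_cons, ih, PySem.Dict.contains_insert, List.mem_cons]
    by_cases h : y = x <;> by_cases h2 : y ∈ ks <;> simp [h, h2]

lemma nodup_keys_build (ks : List Int) (d : PySem.Dict Int Int) (hnd : d.keys.Nodup) :
    (ks.foldl (fun d i => d.insert i 0) d).keys.Nodup := by
  induction ks generalizing d with
  | nil => exact hnd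
  | cons x ks ih => exact ih _ (PySem.Dict.nodup_keys_insert d x 0 hnd)

lemma items_countfold (sc : List Int) (d : PySem.Dict Int Int)
    (hnd : d.keys.Nodup) (hc : ∀ s ∈ sc, d.contains s = true) :
    (sc.foldl (fun d s => d.modify s 0 (· + 1)) d).items
      = d.items.map (fun p => (p.1, p.2 + (List.count p.1 sc : Int))) := by
  induction sc generalizing d with
  | nil => simp
  | cons s sc ih =>
    simp only [List.foldl_cons]
    have hmod : d.modify s 0 (· + 1) = d.insert s (d.getD s 0 + 1) := rfl
    rw [ih (d.modify s 0 (· + 1)) ?_ ?_]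
    · rw [hmod, PySem.Dict.items_insert_of_contains d _ (hc s (by simp)), List.map_map]
      apply List.map_congr_left
      intro p hp
      by_cases hps : p.1 = s
      · have : d.get? p.1 = some p.2 := PySem.Dict.get?_of_mem_items d (by exact hp) hnd
        have hgd : d.getD s 0 = p.2 := by
          rw [← hps, PySem.Dict.getD_eq_get?_getD, this]; rfl
        simp only [Function.comp, hps, beq_self_eq_true, if_pos, hgd]
        simp
        ring
      · have : (p.1 == s) = false := by simp [hps]
        simp only [Function.comp, this]
        simp [Ne.symm hps]
    · rw [hmod]; exact PySem.Dict.nodup_keys_insert d _ _ hnd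
    · intro y hy
      rw [PySem.Dict.contains_modify]
      simp [hc y (List.mem_cons_of_mem _ hy)]

lemma afold_spec (m : Nat) (ps : List (Int × Nat)) :
    ∀ (a : Int) (r : Nat),
    ((ps.map (fun p => (p.1, (p.2 : Int)))).foldl
      (fun (acc : Int × Int) kv =>
        (acc.1 + kv.1 * (m : Int) * PySem.Int.floordiv (kv.2 + acc.2) (m : Int),
         PySem.Int.mod (kv.2 + acc.2) (m : Int))) (a, (r : Int))).1
      = a + (m : Int) * afold m ps r := by
  induction ps with
  | nil => intro a r; simp [afold]
  | cons p ps ih =>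
    intro a r
    obtain ⟨j, c⟩ := p
    simp only [List.map_cons, List.foldl_cons]
    have h1 : ((c : Int) + (r : Int)) = ((c + r : Nat) : Int) := by push_cast; ring
    rw [h1, PySem.Int.floordiv_natCast, PySem.Int.mod_natCast, ih]
    simp [afold]; ring

lemma chunk_block (m : Nat) (hm : 0 < m) (j : Int) (rest : List Int) :
    ∀ c : Nat, ∀ t : List Int, t.length < m →
    ∃ t' : List Int, t'.length = (t.length + c) % m ∧
      chunkSum m (t ++ (List.replicate c j ++ rest))
        = j * (((t.length + c) / m : Nat) : Int) + chunkSum m (t' ++ rest) := by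
  intro c
  induction c using Nat.strong_induction_on with
  | _ c ih =>
  intro t ht
  by_cases hcase : t.length + c < m
  · refine ⟨t ++ List.replicate c j, by simp [Nat.mod_eq_of_lt hcase], ?_⟩
    rw [Nat.div_eq_of_lt hcase]
    simp [List.append_assoc]
  · rw [not_lt] at hcase
    have hlen : m ≤ (t ++ (List.replicate c j ++ rest)).length := by simp; omega
    have hget : (t ++ (List.replicate c j ++ rest)).getD (m - 1) 0 = j := by
      rw [List.getD_eq_getElem?_getD,
        List.getElem?_append_right (l₁ := t) (by omega),
        List.getElem?_append_left (l₁ := List.replicate c j)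
          (by rw [List.length_replicate]; omega),
        List.getElem?_replicate, if_pos (by omega)]
      rfl
    have hdrop : (t ++ (List.replicate c j ++ rest)).drop m
        = List.replicate (c - (m - t.length)) j ++ rest := by
      rw [List.drop_append, List.drop_append, List.drop_replicate, List.length_replicate,
        List.drop_eq_nil_of_le (by omega), List.nil_append,
        show m - t.length - c = 0 by omega, List.drop_zero]
    rw [chunkSum, dif_pos ⟨hm, hlen⟩, hget, hdrop]
    obtain ⟨t', ht', heq⟩ := ih (c - (m - t.length)) (by omega) [] (by simpa using hm)
    simp only [List.nil_append, List.length_nil, Nat.zero_add] at heq ht'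
    refine ⟨t', ?_, ?_⟩
    · rw [ht', show t.length + c = (c - (m - t.length)) + m by omega, Nat.add_mod_right]
    · rw [heq, show (t.length + c) / m = (c - (m - t.length)) / m + 1 by
        rw [show t.length + c = (c - (m - t.length)) + m by omega, Nat.add_div_right _ hm]]
      push_cast
      ring

lemma chunk_eq_afold (m : Nat) (hm : 0 < m) (ps : List (Int × Nat)) :
    ∀ t : List Int, t.length < m →
    chunkSum m (t ++ ps.flatMap (fun p => List.replicate p.2 p.1)) = afold m ps t.length := by
  induction ps with
  | nil =>
    intro t ht
    simp only [List.flatMap_nil, List.append_nil]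
    rw [chunkSum_small ht]; rfl
  | cons p ps ih =>
    intro t ht
    obtain ⟨j, c⟩ := p
    simp only [List.flatMap_cons]
    obtain ⟨t', ht', heq⟩ := chunk_block m hm j _ c t ht
    rw [heq, ih t' (by rw [ht']; exact Nat.mod_lt _ hm)]
    simp only [afold, ht']
    rw [Nat.add_comm c t.length]

-- (B1) the while-loop walk computes m * chunkSum; d is the prefix conceptually consumed
lemma strideLoop_eq (s : List Int) (mN : Nat) (hm : 0 < mN) :
    ∀ fuel d : Nat, ∀ a : Int, (s.length : Int) - d ≤ fuel →
    strideLoop s (mN : Int) fuel ((mN : Int) - 1 + d) a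
      = a + (mN : Int) * chunkSum mN (s.drop d) := by
  intro fuel
  induction fuel with
  | zero =>
    intro d a h
    rw [strideLoop, chunkSum_small (by simp; omega)]
    ring
  | succ fuel ih =>
    intro d a h
    rw [strideLoop]
    by_cases hcase : (mN : Int) - 1 + d < (s.length : Int)
    · have hstep : (s.length : Int) - ((d + mN : Nat) : Int) ≤ (fuel : Int) := by
        push_cast at h ⊢
        omega
      have hopen : chunkSum mN (s.drop d)
          = (s.drop d).getD (mN - 1) 0 + chunkSum mN (s.drop (d + mN)) := by
        rw [chunkSum, dif_pos ⟨hm, by simp; omega⟩, List.drop_drop]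
      have hget : PySem.List.pyGetD s ((mN : Int) - 1 + d) 0 = (s.drop d).getD (mN - 1) 0 := by
        rw [List.getD_eq_getElem?_getD, List.getElem?_drop,
          show (mN : Int) - 1 + (d : Int) = ((d + (mN - 1) : Nat) : Int) by
            push_cast [Nat.cast_sub hm]; ring,
          PySem.List.pyGetD_natCast, List.getD_eq_getElem?_getD]
      rw [if_pos hcase,
        show (mN : Int) - 1 + (d : Int) + (mN : Int) = (mN : Int) - 1 + ((d + mN : Nat) : Int) by
          push_cast; ring,
        ih (d + mN) _ hstep, hopen, hget]
      ring
    · rw [if_neg hcase, chunkSum_small (by simp; omega)]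
      ring

lemma cnt_fold (sc : List Int) :
    ∀ c : List Int, (∀ x ∈ sc, 1 ≤ x ∧ x ≤ (c.length : Int)) →
    (sc.foldl (fun c x =>
        PySem.List.pySetD c (x - 1) (PySem.List.pyGetD c (x - 1) 0 + 1)) c).length = c.length
    ∧ ∀ v : Int, 1 ≤ v → v ≤ (c.length : Int) →
      PySem.List.pyGetD (sc.foldl (fun c x =>
        PySem.List.pySetD c (x - 1) (PySem.List.pyGetD c (x - 1) 0 + 1)) c) (v - 1) 0
        = PySem.List.pyGetD c (v - 1) 0 + (List.count v sc : Int) := by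
  induction sc with
  | nil => intro c _; simp
  | cons x sc ih =>
    intro c hb
    obtain ⟨hx1, hx2⟩ := hb x (by simp)
    simp only [List.foldl_cons]
    have hlen : (PySem.List.pySetD c (x - 1) (PySem.List.pyGetD c (x - 1) 0 + 1)).length
        = c.length := PySem.List.length_pySetD c _ _
    obtain ⟨ihl, ihg⟩ := ih (PySem.List.pySetD c (x - 1) (PySem.List.pyGetD c (x - 1) 0 + 1))
      (by intro y hy; rw [hlen]; exact hb y (List.mem_cons_of_mem _ hy))
    refine ⟨by rw [ihl, hlen], ?_⟩
    intro v hv1 hv2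
    rw [ihg v hv1 (by rw [hlen]; exact hv2)]
    have hset : PySem.List.pyGetD (PySem.List.pySetD c (x - 1)
        (PySem.List.pyGetD c (x - 1) 0 + 1)) (v - 1) 0
        = PySem.List.pyGetD c (v - 1) 0 + (if v = x then 1 else 0) := by
      rw [PySem.List.pySetD_of_nonneg c _ (by omega),
        PySem.List.pyGetD_eq_getElem _ 0 (by omega) (by simp; omega), List.getElem_set]
      by_cases hvx : v = x
      · subst hvx
        rw [if_pos rfl, if_pos rfl,
          PySem.List.pyGetD_eq_getElem _ 0 (by omega) (by omega)]
      · rw [if_neg (by omega), if_neg hvx, add_zero,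
          PySem.List.pyGetD_eq_getElem c (i := v - 1) 0 (by omega) (by omega)]
    rw [hset, List.count_cons]
    by_cases hvx : v = x
    · subst hvx
      rw [if_pos rfl, if_pos (by simp)]
      push_cast; ring
    · rw [if_neg hvx, if_neg (by simp only [beq_iff_eq]; exact fun h => hvx h.symm)]
      push_cast; ring

-- (S) the built list s is the concatenation of the constant blocks, keys k..1
lemma s_build (K : List Int) (cnt : List Int) (f : Int → Nat)
    (h : ∀ v ∈ K, PySem.List.pyGetD cnt (v - 1) 0 = (f v : Int)) :
    K.foldl (fun s v => s ++ PySem.List.pyRepeat [v] (PySem.List.pyGetD cnt (v - 1) 0)) []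
      = K.flatMap (fun v => List.replicate (f v) v) := by
  rw [PySem.List.foldl_append_eq_flatMap, List.nil_append]
  induction K with
  | nil => rfl
  | cons v K ih =>
    simp only [List.flatMap_cons]
    rw [ih (fun y hy => h y (List.mem_cons_of_mem _ hy)),
      h v (by simp), PySem.List.pyRepeat_singleton, Int.toNat_natCast]

-- ===== VERDICT (by name: the statement is the Claim_ definition above) =====

theorem solution_spec : Claim_equal_solution := by
  intro k m score _ hpre
  obtain ⟨hm, hsc⟩ := hpre
  obtain ⟨mN, rfl⟩ : ∃ mN : Nat, m = (mN : Int) :=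
    ⟨m.toNat, (Int.toNat_of_nonneg (by omega)).symm⟩
  have hmN : 0 < mN := by exact_mod_cast hm
  unfold Spec_solution solution solution_alt
  simp only []
  have hKnd : (PySem.List.pyRange k 0 (-1)).Nodup := by
    rw [PySem.List.pyRange_neg_one_eq_reverse]
    exact List.nodup_reverse.mpr (PySem.List.nodup_pyRange_one _ _)
  have hmem : ∀ x ∈ score, x ∈ PySem.List.pyRange k 0 (-1) := fun x hx =>
    PySem.List.mem_pyRange_neg_one.mpr ⟨by have := (hsc x hx).1; omega, (hsc x hx).2⟩
  -- A side: the dict's items are the (key, count) pairs in order k..1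
  have hbuild : ((PySem.List.pyRange k 0 (-1)).foldl
      (fun d i => d.insert i 0) (PySem.Dict.empty : PySem.Dict Int Int)).items
      = (PySem.List.pyRange k 0 (-1)).map (fun j => (j, (0 : Int))) := by
    rw [items_build _ _ hKnd (fun x _ => PySem.Dict.contains_empty x)]
    rfl
  have hcont : ∀ s ∈ score, ((PySem.List.pyRange k 0 (-1)).foldl
      (fun d i => d.insert i 0) (PySem.Dict.empty : PySem.Dict Int Int)).contains s = true := by
    intro s hs
    rw [contains_build]
    simp [hmem s hs]
  have hnk : ((PySem.List.pyRange k 0 (-1)).foldl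
      (fun d i => d.insert i 0) (PySem.Dict.empty : PySem.Dict Int Int)).keys.Nodup := by
    apply nodup_keys_build
    exact PySem.Dict.nodup_keys_empty
  have hitems : ((score.foldl (fun d s => d.modify s 0 (· + 1))
      ((PySem.List.pyRange k 0 (-1)).foldl (fun d i => d.insert i 0)
        (PySem.Dict.empty : PySem.Dict Int Int)))).items
      = ((PySem.List.pyRange k 0 (-1)).map
          (fun j => (j, List.count j score))).map (fun p => (p.1, (p.2 : Int))) := by
    rw [items_countfold _ _ hnk hcont, hbuild, List.map_map, List.map_map]
    apply List.map_congr_left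
    intro j _
    simp
  have ha := afold_spec mN ((PySem.List.pyRange k 0 (-1)).map
    (fun j => (j, List.count j score))) 0 0
  simp only [Nat.cast_zero] at ha
  rw [hitems, ha]
  -- B side
  have hb := cnt_fold score (PySem.List.pyRepeat [0] k)
    (by
      intro x hx
      have := hsc x hx
      rw [PySem.List.pyRepeat_singleton, List.length_replicate]
      omega)
  have hs : ((PySem.List.pyRange k 0 (-1)).foldl
      (fun s v => s ++ PySem.List.pyRepeat [v] (PySem.List.pyGetD
        (score.foldl (fun c x =>
          PySem.List.pySetD c (x - 1) (PySem.List.pyGetD c (x - 1) 0 + 1))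
          (PySem.List.pyRepeat [0] k)) (v - 1) 0)) [])
      = (PySem.List.pyRange k 0 (-1)).flatMap
          (fun v => List.replicate (List.count v score) v) := by
    apply s_build
    intro v hv
    obtain ⟨hv0, hvk⟩ := PySem.List.mem_pyRange_neg_one.mp hv
    have hvlen : v ≤ ((PySem.List.pyRepeat [(0 : Int)] k).length : Int) := by
      rw [PySem.List.pyRepeat_singleton, List.length_replicate]
      omega
    rw [(hb.2 v (by omega) hvlen), PySem.List.pyRepeat_singleton,
      PySem.List.pyGetD_eq_getElem _ 0 (by omega) (by simp; omega),
      List.getElem_replicate]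
    ring
  rw [hs]
  have hsl := strideLoop_eq ((PySem.List.pyRange k 0 (-1)).flatMap
      (fun v => List.replicate (List.count v score) v)) mN hmN
    ((PySem.List.pyRange k 0 (-1)).flatMap
      (fun v => List.replicate (List.count v score) v)).length 0 0 (by simp)
  simp only [Nat.cast_zero, add_zero, zero_add, List.drop_zero] at hsl
  rw [hsl]
  have hflat : (PySem.List.pyRange k 0 (-1)).flatMap (fun j => List.replicate (List.count j score) j)
      = ((PySem.List.pyRange k 0 (-1)).map (fun j => (j, List.count j score))).flatMap
          (fun p => List.replicate p.2 p.1) := by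
    rw [List.flatMap_map]
  rw [hflat]
  have hc := chunk_eq_afold mN hmN
    ((PySem.List.pyRange k 0 (-1)).map (fun j => (j, List.count j score))) []
    (by simpa using hmN)
  simp only [List.nil_append, List.length_nil] at hc
  rw [hc]
  ring
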